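-- pv_equiv track=rewrite | github.com/riot662006/conway-game-of-life | game/entities/patterns.py | rle_to_pat
-- ===== SOURCE A (Python) =====
-- def rle_to_pat(p):
--     """
--         Converts an RLE pattern to a pattern for the board.
--
--     :param p: string
--     :return: list[tuple[int, int]]
--     """
--
--     assert not (any([a not in "bo$!1234567890" for a in p])), "Invalid character for RLE format"
--     assert p.find('!') == -1 or p.find('!') == len(p) - 1, "'!' must be at the end of the pattern"
--
--     p = p if p[-1] != '!' else p[:-1]
--     pattern = []
--
--     j = 0
--
--     for line in p.split("$"):
--         i = 0
--         num = ''
--         for c in line: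
--             if c in "1234567890":
--                 num += c
--             else:
--                 num = int(num) if len(num) else 1
--                 if c == 'o':
--                     pattern += [(i, j) for i in range(i, i + num)]
--                 i += num
--                 num = ''
--
--         j += int(num) if len(num) else 1
--
--     return pattern
-- ===== SOURCE B (Python) =====
-- def rle_to_pat(p):
--     """
--         Converts an RLE pattern to a pattern for the board.
--
--     :param p: string
--     :return: list[tuple[int, int]]
--     """
--
--     assert not (any([a not in "bo$!1234567890" for a in p])), "Invalid character for RLE format"
--     assert p.find('!') == -1 or p.find('!') == len(p) - 1, "'!' must be at the end of the pattern"
--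
--     p = p if p[-1] != '!' else p[:-1]
--
--     # Pass 1: tokenize the whole pattern into (count_string, tag) pairs;
--     # a trailing run of digits with no tag is dropped, like an unterminated count.
--     tokens = []
--     num = ''
--     for c in p:
--         if c.isdigit():
--             num += c
--         else:
--             tokens.append((num, c))
--             num = ''
--
--     # Pass 2: interpret the token stream with a running cursor (i, j).
--     cells = []
--     i = 0
--     j = 0
--     for count, tag in tokens:
--         n = int(count or '1')
--         if tag == 'o':
--             for x in range(i, i + n):
--                 cells.append((x, j))
--             i += n
--         elif tag == 'b':
--             i += n
--         else:  # '$' (the only other tag after validation)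
--             j += n
--             i = 0
--     return cells
-- ===== Notes on version B (the rewrite author's own statement) =====
-- stated objective: alternative
-- what changed: Replaces A's split('$') plus a nested per-line char scan with a flat two-phase pass: tokenize the whole pattern into (count, tag) pairs, then interpret the token stream with a running (i, j) cursor where '$' tokens advance j and reset i.
import Mathlib
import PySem

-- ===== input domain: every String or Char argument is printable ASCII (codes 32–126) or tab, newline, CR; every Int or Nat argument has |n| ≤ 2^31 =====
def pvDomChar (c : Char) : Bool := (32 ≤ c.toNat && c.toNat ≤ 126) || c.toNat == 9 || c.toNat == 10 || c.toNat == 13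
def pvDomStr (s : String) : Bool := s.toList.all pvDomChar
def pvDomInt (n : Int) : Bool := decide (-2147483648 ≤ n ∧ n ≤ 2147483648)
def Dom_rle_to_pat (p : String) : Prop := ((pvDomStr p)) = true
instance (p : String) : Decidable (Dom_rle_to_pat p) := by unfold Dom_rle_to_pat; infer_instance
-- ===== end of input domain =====

-- B replaces A's split('$')-plus-nested-scan with a flat tokenize-then-interpret pass (alternative decomposition, same cost).

-- ===== PORT A =====
-- c in "1234567890"
def pvDigitsA : List Char := ['1', '2', '3', '4', '5', '6', '7', '8', '9', '0']

-- int(num) if len(num) else 1 ; num is always a run of digits here, so ofChars? is some and the .getD default is unreachable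
def pvParseA (num : List Char) : Int :=
  if num.length ≠ 0 then (PySem.Int.ofChars? num).getD 0 else 1

-- the body of the inner `for c in line` loop; j is the enclosing line state
def pvCharStepA (j : Int) (s : Int × List Char × List (Int × Int)) (c : Char) :
    Int × List Char × List (Int × Int) :=
  if c ∈ pvDigitsA then (s.1, s.2.1 ++ [c], s.2.2)
  else
    let num := pvParseA s.2.1
    let pat := if c = 'o' then s.2.2 ++ (PySem.List.pyRange s.1 (s.1 + num) 1).map (fun i => (i, j)) else s.2.2
    (s.1 + num, [], pat)

-- the body of the outer `for line in p.split("$")` loop, state (j, pattern)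
def pvLineStepA (st : Int × List (Int × Int)) (line : List Char) : Int × List (Int × Int) :=
  let s := line.foldl (pvCharStepA st.1) (0, [], st.2)
  (st.1 + pvParseA s.2.1, s.2.2)

-- the two asserts and p[-1] only raise; Pre_rle_to_pat is exactly where they pass
def rle_to_pat (p : String) : List (Int × Int) :=
  let p2 := if PySem.Str.pyGet? p (-1) ≠ some '!' then p.toList
            else PySem.Chars.slice p.toList none (some (-1))
  ((PySem.Chars.splitOn p2 ['$']).foldl pvLineStepA ((0 : Int), ([] : List (Int × Int)))).2

-- ===== PORT B =====
-- pass 1: tokenize into (count, tag) pairs; a trailing digit run with no tag is dropped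
def pvTokenize (num : List Char) : List Char → List (List Char × Char)
  | [] => []
  | c :: cs => if PySem.Chars.isdigit c then pvTokenize (num ++ [c]) cs else (num, c) :: pvTokenize [] cs

-- pass 2: interpret the token stream with the running cursor (i, j)
def pvRun : List (List Char × Char) → Int → Int → List (Int × Int) → List (Int × Int)
  | [], _, _, cells => cells
  | (count, tag) :: ts, i, j, cells =>
    -- n = int(count or '1'); count is a digit run, so ofChars? is some and .getD is unreachable
    let n := (PySem.Int.ofChars? (if count = [] then ['1'] else count)).getD 0
    if tag = 'o' then pvRun ts (i + n) j (cells ++ (PySem.List.pyRange i (i + n) 1).map (fun x => (x, j)))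
    else if tag = 'b' then pvRun ts (i + n) j cells
    else pvRun ts 0 (j + n) cells

def rle_to_pat_alt (p : String) : List (Int × Int) :=
  let p2 := if PySem.Str.pyGet? p (-1) ≠ some '!' then p.toList
            else PySem.Chars.slice p.toList none (some (-1))
  pvRun (pvTokenize [] p2) 0 0 []

-- ===== PRECONDITION & SPEC =====
-- Pre_ is exactly where the Python A returns: p nonempty (p[-1] raises IndexError on ""),
-- every char in "bo$!1234567890" (first assert), and '!' at most as the last char (second assert).
def Pre_rle_to_pat (p : String) : Prop :=
  p.toList ≠ [] ∧
  p.toList.all (fun c => c ∈ ['b', 'o', '$', '!', '1', '2', '3', '4', '5', '6', '7', '8', '9', '0']) = true ∧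
  '!' ∉ p.toList.dropLast
instance (p : String) : Decidable (Pre_rle_to_pat p) := by unfold Pre_rle_to_pat; infer_instance

def pvWitness_rle_to_pat : String := "3o$2bo!"

def Spec_rle_to_pat (p : String) (out : List (Int × Int)) : Prop := out = rle_to_pat_alt p
instance (p : String) (out : List (Int × Int)) : Decidable (Spec_rle_to_pat p out) := by unfold Spec_rle_to_pat; infer_instance

-- ===== CLAIM (what is proved, stated in full; the proofs are below) =====
def Claim_equal_rle_to_pat : Prop := ∀ (p : String), Dom_rle_to_pat p → Pre_rle_to_pat p → Spec_rle_to_pat p (rle_to_pat p)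

-- ===== LEMMAS AND PROOFS =====

-- clean recursive form of p.split("$"): (first line, remaining lines)
def pvSplit : List Char → List Char × List (List Char)
  | [] => ([], [])
  | c :: cs =>
    if c = '$' then ([], (pvSplit cs).1 :: (pvSplit cs).2)
    else (c :: (pvSplit cs).1, (pvSplit cs).2)

theorem pvSplit_go (fuel : Nat) (l cur : List Char) (acc : List (List Char))
    (h : l.length < fuel) :
    PySem.Chars.splitOn.go ['$'] fuel l cur acc =
      acc.reverse ++ (cur.reverse ++ (pvSplit l).1) :: (pvSplit l).2 := by
  induction fuel generalizing l cur acc with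
  | zero => omega
  | succ fuel ih =>
    cases l with
    | nil => simp [PySem.Chars.splitOn.go, pvSplit]
    | cons c rest =>
      rw [PySem.Chars.splitOn.go]
      by_cases hc : c = '$'
      · subst hc
        simp only [List.isPrefixOf, if_pos, pvSplit]
        rw [if_pos (by simp)]
        simp only [List.length_cons, List.length_nil, List.drop_succ_cons, List.drop_zero]
        rw [ih rest [] (cur.reverse :: acc) (by simpa using Nat.lt_of_succ_lt_succ (by simpa using h))]
        simp
      · rw [if_neg (by simp only [List.isPrefixOf]; simp; exact fun hh => hc hh.symm)]
        rw [ih rest (c :: cur) acc (by simpa using Nat.lt_of_succ_lt_succ (by simpa using h))]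
        simp [pvSplit, hc]

theorem pvSplit_splitOn (cs : List Char) :
    PySem.Chars.splitOn cs ['$'] = (pvSplit cs).1 :: (pvSplit cs).2 := by
  unfold PySem.Chars.splitOn
  rw [pvSplit_go (cs.length + 1) cs [] [] (by omega)]
  simp

-- B's int(count or '1') is A's `int(num) if len(num) else 1`
theorem pvParse_or (count : List Char) :
    (PySem.Int.ofChars? (if count = [] then ['1'] else count)).getD 0 = pvParseA count := by
  cases count with
  | nil => decide
  | cons a l => simp [pvParseA]

-- A's computation re-expressed on pvSplit, mid-line, with current inner state (i, num, pat) and row j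
def pvAH (cs : List Char) (i : Int) (num : List Char) (pat : List (Int × Int)) (j : Int) :
    Int × List (Int × Int) :=
  let s := ((pvSplit cs).1).foldl (pvCharStepA j) (i, num, pat)
  ((pvSplit cs).2).foldl pvLineStepA (j + pvParseA s.2.1, s.2.2)

theorem pvAH_eq_pvRun (cs : List Char)
    (h : ∀ c ∈ cs, c ∈ ['b', 'o', '$', '1', '2', '3', '4', '5', '6', '7', '8', '9', '0']) :
    ∀ (i : Int) (num : List Char) (pat : List (Int × Int)) (j : Int),
      (pvAH cs i num pat j).2 = pvRun (pvTokenize num cs) i j pat := by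
  induction cs with
  | nil => intro i num pat j; simp [pvAH, pvSplit, pvTokenize, pvRun]
  | cons c cs ih =>
    intro i num pat j
    have hc := h c (by simp)
    have hcs : ∀ c ∈ cs, c ∈ ['b', 'o', '$', '1', '2', '3', '4', '5', '6', '7', '8', '9', '0'] :=
      fun x hx => h x (by simp [hx])
    have hih := ih hcs
    simp only [List.mem_cons, List.not_mem_nil, or_false] at hc
    rcases hc with rfl | rfl | rfl | hdig
    · -- 'b': advance i
      rw [show pvTokenize num ('b' :: cs) = (num, 'b') :: pvTokenize [] cs from rfl]
      rw [show pvRun ((num, 'b') :: pvTokenize [] cs) i j pat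
            = pvRun (pvTokenize [] cs) (i + pvParseA num) j pat by simp [pvRun, pvParse_or]]
      rw [← hih (i + pvParseA num) [] pat j]
      simp [pvAH, pvSplit, pvCharStepA, pvDigitsA]
    · -- 'o': emit cells and advance i
      rw [show pvTokenize num ('o' :: cs) = (num, 'o') :: pvTokenize [] cs from rfl]
      rw [show pvRun ((num, 'o') :: pvTokenize [] cs) i j pat
            = pvRun (pvTokenize [] cs) (i + pvParseA num) j
                (pat ++ (PySem.List.pyRange i (i + pvParseA num) 1).map (fun x => (x, j))) by
            simp [pvRun, pvParse_or]]
      rw [← hih (i + pvParseA num) []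
            (pat ++ (PySem.List.pyRange i (i + pvParseA num) 1).map (fun x => (x, j))) j]
      simp [pvAH, pvSplit, pvCharStepA, pvDigitsA]
    · -- '$': next row, fresh line
      rw [show pvTokenize num ('$' :: cs) = (num, '$') :: pvTokenize [] cs from rfl]
      rw [show pvRun ((num, '$') :: pvTokenize [] cs) i j pat
            = pvRun (pvTokenize [] cs) 0 (j + pvParseA num) pat by simp [pvRun, pvParse_or]]
      rw [← hih 0 [] pat (j + pvParseA num)]
      simp [pvAH, pvSplit, pvLineStepA, pvParseA]
    · -- a digit: both sides accumulate the count
      have hd : PySem.Chars.isdigit c = true := by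
        rcases hdig with rfl | rfl | rfl | rfl | rfl | rfl | rfl | rfl | rfl | rfl <;> decide
      have hdA : c ∈ pvDigitsA := by
        rcases hdig with rfl | rfl | rfl | rfl | rfl | rfl | rfl | rfl | rfl | rfl <;> decide
      have hne : c ≠ '$' := by rintro rfl; exact absurd hdA (by decide)
      rw [show pvTokenize num (c :: cs) = pvTokenize (num ++ [c]) cs by simp [pvTokenize, hd]]
      rw [← hih i (num ++ [c]) pat j]
      simp only [pvAH, pvSplit]
      rw [if_neg hne]
      simp only [List.foldl_cons]
      rw [show pvCharStepA j (i, num, pat) c = (i, num ++ [c], pat) by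
            simp [pvCharStepA, hdA]]

theorem rle_to_pat_eq_pvAH (cs : List Char) :
    ((PySem.Chars.splitOn cs ['$']).foldl pvLineStepA ((0 : Int), ([] : List (Int × Int)))).2
      = (pvAH cs 0 [] [] 0).2 := by
  rw [pvSplit_splitOn]
  simp only [List.foldl_cons]
  rw [show pvLineStepA (0, []) (pvSplit cs).1
        = (0 + pvParseA (((pvSplit cs).1.foldl (pvCharStepA 0) (0, [], [])).2.1),
           ((pvSplit cs).1.foldl (pvCharStepA 0) (0, [], [])).2.2) from rfl]
  rfl

-- the stripped pattern contains only "bo$" and digits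
theorem pvStripped_valid (p : String) (hp : Pre_rle_to_pat p) :
    ∀ c ∈ (if PySem.Str.pyGet? p (-1) ≠ some '!' then p.toList
           else PySem.Chars.slice p.toList none (some (-1))),
      c ∈ ['b', 'o', '$', '1', '2', '3', '4', '5', '6', '7', '8', '9', '0'] := by
  obtain ⟨hne, hallb, hbang⟩ := hp
  have hall : ∀ c ∈ p.toList, c ∈ ['b', 'o', '$', '!', '1', '2', '3', '4', '5', '6', '7', '8', '9', '0'] := by
    simpa using hallb
  intro c hc
  by_cases hlast : PySem.Str.pyGet? p (-1) = some '!'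
  · rw [if_neg (not_not_intro hlast)] at hc
    have hc' : c ∈ p.toList.dropLast := by
      simpa [PySem.Chars.slice_eq_listSlice, PySem.List.slice_to_neg_one] using hc
    have hmem := hall c (List.dropLast_subset _ hc')
    have hcne : c ≠ '!' := fun h => hbang (h ▸ hc')
    simp only [List.mem_cons, List.not_mem_nil, or_false] at hmem
    rcases hmem with rfl | rfl | rfl | rfl | rfl | rfl | rfl | rfl | rfl | rfl | rfl | rfl | rfl | rfl
    all_goals first | exact absurd rfl hcne | decide
  · rw [if_pos hlast] at hc
    have hmem := hall c hc
    have hcne : c ≠ '!' := by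
      rintro rfl
      rcases List.eq_nil_or_concat p.toList with h | ⟨ys, a, h⟩
      · exact hne h
      · rw [List.concat_eq_append] at h
        rcases List.mem_append.mp (h ▸ hc) with hy | ha
        · exact hbang (by simp [h, hy])
        · have hx : a = '!' := by have := ha; simp at this; exact this.symm
          exact hlast (by
            simp [h, hx, PySem.List.pyGet?_neg_one_append_singleton])
    simp only [List.mem_cons, List.not_mem_nil, or_false] at hmem
    rcases hmem with rfl | rfl | rfl | rfl | rfl | rfl | rfl | rfl | rfl | rfl | rfl | rfl | rfl | rfl
    all_goals first | exact absurd rfl hcne | decide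

-- ===== VERDICT (by name: the statement is the Claim_ definition above) =====
theorem rle_to_pat_spec : Claim_equal_rle_to_pat := by
  intro p _ hp
  unfold Spec_rle_to_pat rle_to_pat rle_to_pat_alt
  rw [rle_to_pat_eq_pvAH]
  exact pvAH_eq_pvRun _ (pvStripped_valid p hp) 0 [] [] 0
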